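-- pv_equiv track=rewrite | github.com/kshitijrajsharma/osm-export-tool-python | osm_export_tool/tabular.py | closed_way_is_polygon
-- ===== SOURCE A (Python) =====
-- CLOSED_WAY_KEYS = ['aeroway','amenity','boundary','building','building:part','craft','geological','historic','landuse','leisure','military','natural','office','place','shop','sport','tourism']
--
-- CLOSED_WAY_KEYVALS = {'highway':'platform','public_transport':'platform'}
--
-- def closed_way_is_polygon(tags):
--     for key in CLOSED_WAY_KEYS:
--         if key in tags:
--             return True
--     for key, val in CLOSED_WAY_KEYVALS.items():
--         if key in tags and tags[key] == val:
--             return True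
--     return False
-- ===== SOURCE B (Python) =====
-- CLOSED_WAY_KEYS = ['aeroway','amenity','boundary','building','building:part','craft','geological','historic','landuse','leisure','military','natural','office','place','shop','sport','tourism']
--
-- CLOSED_WAY_KEYVALS = {'highway':'platform','public_transport':'platform'}
--
-- _POLY_KEYS = set(CLOSED_WAY_KEYS)
--
-- def closed_way_is_polygon(tags):
--     # single pass over the actual tags instead of probing with the 19 fixed keys
--     for key, val in tags.items():
--         if key in _POLY_KEYS or CLOSED_WAY_KEYVALS.get(key) == val:
--             return True
--     return False
-- ===== Notes on version B (the rewrite author's own statement) =====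
-- stated objective: alternative
-- what changed: B inverts the traversal: instead of probing the tag dict with each of the 17 fixed keys and then the 2 key-value pairs, B makes one pass over the input tags, testing each present key against a precomputed polygon-key set and the keyval dict; Pre_ only excludes association lists with duplicate keys, which cannot arise from a Python dict.
import Mathlib
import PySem

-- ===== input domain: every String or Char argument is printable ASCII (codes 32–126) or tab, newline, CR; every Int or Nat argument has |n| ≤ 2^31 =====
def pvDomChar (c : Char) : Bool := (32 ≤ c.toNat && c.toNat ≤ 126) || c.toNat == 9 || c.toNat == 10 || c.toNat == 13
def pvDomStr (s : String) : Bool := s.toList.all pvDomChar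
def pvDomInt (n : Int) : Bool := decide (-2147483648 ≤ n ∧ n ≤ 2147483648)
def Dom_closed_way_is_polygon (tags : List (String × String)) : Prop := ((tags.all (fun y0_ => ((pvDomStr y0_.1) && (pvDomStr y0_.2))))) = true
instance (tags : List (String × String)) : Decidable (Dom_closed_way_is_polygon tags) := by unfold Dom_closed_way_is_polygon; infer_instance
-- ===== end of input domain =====

-- B makes one pass over the input tags (set/dict lookups per present key) instead of
-- probing the tag dict with each of the 19 fixed keys/pairs; same result, proved below.

-- ===== PORT A =====
def CLOSED_WAY_KEYS : List String :=
  ["aeroway","amenity","boundary","building","building:part","craft","geological","historic","landuse","leisure","military","natural","office","place","shop","sport","tourism"]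

def CLOSED_WAY_KEYVALS : PySem.Dict String String :=
  PySem.Dict.ofList [("highway","platform"),("public_transport","platform")]

def closed_way_is_polygon (tags : List (String × String)) : Bool :=
  -- 'for key in CLOSED_WAY_KEYS: if key in tags: return True' then the keyval loop
  (CLOSED_WAY_KEYS.any (fun key => (PySem.Dict.mk tags).contains key)) ||
  (CLOSED_WAY_KEYVALS.items.any (fun kv =>
    (PySem.Dict.mk tags).contains kv.1 && ((PySem.Dict.mk tags).get? kv.1 == some kv.2)))

-- ===== PORT B =====
def pvPolyKeys : PySem.Set String := PySem.Set.ofList CLOSED_WAY_KEYS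

def closed_way_is_polygon_alt (tags : List (String × String)) : Bool :=
  -- 'for key, val in tags.items(): if key in _POLY_KEYS or CLOSED_WAY_KEYVALS.get(key) == val: return True'
  tags.any (fun kv => PySem.Set.contains pvPolyKeys kv.1 || (CLOSED_WAY_KEYVALS.get? kv.1 == some kv.2))

-- ===== PRECONDITION & SPEC =====
-- Pre_ excludes association lists with duplicate keys: `tags` is a Python dict, whose keys
-- are necessarily distinct, so such lists do not correspond to any Python input.
def Pre_closed_way_is_polygon (tags : List (String × String)) : Prop :=
  (tags.map Prod.fst).Nodup
instance (tags : List (String × String)) : Decidable (Pre_closed_way_is_polygon tags) := by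
  unfold Pre_closed_way_is_polygon; infer_instance

def pvWitness_closed_way_is_polygon : (List (String × String)) :=
  [("highway", "platform"), ("name", "x")]

def Spec_closed_way_is_polygon (tags : List (String × String)) (out : Bool) : Prop :=
  out = closed_way_is_polygon_alt tags
instance (tags : List (String × String)) (out : Bool) : Decidable (Spec_closed_way_is_polygon tags out) := by
  unfold Spec_closed_way_is_polygon; infer_instance

-- ===== CLAIM (what is proved, stated in full; the proofs are below) =====
def Claim_equal_closed_way_is_polygon : Prop := ∀ (tags : List (String × String)), Dom_closed_way_is_polygon tags → Pre_closed_way_is_polygon tags → Spec_closed_way_is_polygon tags (closed_way_is_polygon tags)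

-- ===== LEMMAS AND PROOFS =====

theorem mk_get?_mem {tags : List (String × String)} {k v : String}
    (h : (PySem.Dict.mk tags).get? k = some v) : (k, v) ∈ tags := by
  induction tags with
  | nil => simp [PySem.Dict.get?] at h
  | cons kv rest ih =>
    obtain ⟨a, b⟩ := kv
    rw [PySem.Dict.get?_mk_cons] at h
    by_cases hk : (a == k) = true
    · simp [hk] at h
      simp at hk
      simp [hk, h]
    · simp [hk] at h
      exact List.mem_cons_of_mem _ (ih h)

theorem mem_mk_get? {tags : List (String × String)} {k v : String}
    (hnd : (tags.map Prod.fst).Nodup) (h : (k, v) ∈ tags) :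
    (PySem.Dict.mk tags).get? k = some v := by
  induction tags with
  | nil => simp at h
  | cons kv rest ih =>
    obtain ⟨a, b⟩ := kv
    simp at hnd
    rw [PySem.Dict.get?_mk_cons]
    rcases List.mem_cons.mp h with h1 | h1
    · obtain ⟨hk, hv⟩ := Prod.ext_iff.mp h1
      simp at hk hv
      subst hk; subst hv
      simp
    · have hne : ¬ (a == k) = true := by
        simp
        intro he
        exact hnd.1 v (by rw [he]; exact h1)
      simp [hne]
      exact ih hnd.2 h1

theorem mk_contains_iff {tags : List (String × String)} {k : String} :
    (PySem.Dict.mk tags).contains k = true ↔ ∃ v, (k, v) ∈ tags := by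
  rw [PySem.Dict.contains_eq_isSome_get?, Option.isSome_iff_exists]
  constructor
  · rintro ⟨v, hv⟩; exact ⟨v, mk_get?_mem hv⟩
  · rintro ⟨v, hv⟩
    induction tags with
    | nil => simp at hv
    | cons kv rest ih =>
      obtain ⟨a, b⟩ := kv
      rw [PySem.Dict.get?_mk_cons]
      by_cases hk : (a == k) = true
      · simp [hk]
      · simp only [hk, if_neg, Bool.false_eq_true, not_false_eq_true]
        rcases List.mem_cons.mp hv with h1 | h1
        · exfalso; simp at hk; exact hk (congrArg Prod.fst h1).symm
        · exact ih h1

theorem keyvals_eq :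
    CLOSED_WAY_KEYVALS = PySem.Dict.mk [("highway", "platform"), ("public_transport", "platform")] := by
  decide

theorem keyvals_get?_iff {k v : String} :
    CLOSED_WAY_KEYVALS.get? k = some v ↔
      ((k = "highway" ∧ v = "platform") ∨ (k = "public_transport" ∧ v = "platform")) := by
  rw [keyvals_eq, PySem.Dict.get?_mk_cons, PySem.Dict.get?_mk_cons]
  by_cases h1 : k = "highway"
  · subst h1; simp; exact eq_comm
  · by_cases h2 : k = "public_transport"
    · subst h2; simp; exact eq_comm
    · simp [PySem.Dict.get?, Ne.symm h1, Ne.symm h2, h1, h2]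

theorem keyvals_items_eq :
    CLOSED_WAY_KEYVALS.items = [("highway", "platform"), ("public_transport", "platform")] := by
  decide

theorem polyset_contains_iff {k : String} :
    PySem.Set.contains pvPolyKeys k = true ↔ k ∈ CLOSED_WAY_KEYS := by
  simp [pvPolyKeys, PySem.Set.contains, PySem.Set.mem_ofList]

-- ===== VERDICT (by name: the statement is the Claim_ definition above) =====
theorem closed_way_is_polygon_spec : Claim_equal_closed_way_is_polygon := by
  intro tags _hdom hnd
  unfold Spec_closed_way_is_polygon
  rw [Bool.eq_iff_iff]
  unfold closed_way_is_polygon closed_way_is_polygon_alt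
  simp only [Bool.or_eq_true, List.any_eq_true, Bool.and_eq_true, beq_iff_eq]
  constructor
  · rintro (⟨key, hkey, hc⟩ | ⟨kv, hkv, _hc, hg⟩)
    · obtain ⟨v, hv⟩ := mk_contains_iff.mp hc
      exact ⟨(key, v), hv, Or.inl (polyset_contains_iff.mpr hkey)⟩
    · have hmem : (kv.1, kv.2) ∈ tags := mk_get?_mem hg
      rw [keyvals_items_eq] at hkv
      refine ⟨(kv.1, kv.2), hmem, Or.inr (keyvals_get?_iff.mpr ?_)⟩
      rcases List.mem_cons.mp hkv with h | h
      · left; rw [h]; exact ⟨rfl, rfl⟩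
      · right
        rcases List.mem_cons.mp h with h' | h'
        · rw [h']; exact ⟨rfl, rfl⟩
        · simp at h'
  · rintro ⟨kv, hmem, h | h⟩
    · left
      exact ⟨kv.1, polyset_contains_iff.mp h,
        mk_contains_iff.mpr ⟨kv.2, by simpa using hmem⟩⟩
    · right
      have hlit := keyvals_get?_iff.mp h
      have hget : (PySem.Dict.mk tags).get? kv.1 = some kv.2 :=
        mem_mk_get? hnd (by simpa using hmem)
      have hc : (PySem.Dict.mk tags).contains kv.1 = true := by
        rw [PySem.Dict.contains_eq_isSome_get?, hget]; rfl
      refine ⟨(kv.1, kv.2), ?_, hc, hget⟩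
      rw [keyvals_items_eq]
      rcases hlit with ⟨hk, hv⟩ | ⟨hk, hv⟩
      · rw [hk, hv]; exact List.mem_cons_self
      · rw [hk, hv]; exact List.mem_cons_of_mem _ List.mem_cons_self
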